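-- pv_equiv track=rewrite | github.com/sushi4me/PracticeProblems | exercises/exercise_problems.py | input_value
-- ===== SOURCE A (Python) =====
-- def input_value(arr, index, value):
--     """
--     Insert the value at the specified index but insert -1 for all other indices passed that are empty.
--     """
--     i = 0
--     while i < index + 1:
--         try:
--             if i == index:
--                 arr[index] = value
--             i += 1
--         except IndexError:
--             arr.insert(i, -1)
--             i -= 1
--
--     return arr
-- ===== SOURCE B (Python) =====
-- def input_value(arr, index, value):
--     """
--     Insert the value at the specified index but insert -1 for all other indices passed that are empty.
--     (Mutates arr in place, like the original.)
--     """
--     if index < 0: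
--         return arr
--     if index >= len(arr):
--         arr.extend([-1] * (index - len(arr) + 1))
--     arr[index] = value
--     return arr
-- ===== Notes on version B (the rewrite author's own statement) =====
-- stated objective: simpler
-- what changed: Replaced the per-index retry loop with try/except IndexError by a closed-form pad count: one bulk extend with -1s followed by a single assignment.
import Mathlib
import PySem

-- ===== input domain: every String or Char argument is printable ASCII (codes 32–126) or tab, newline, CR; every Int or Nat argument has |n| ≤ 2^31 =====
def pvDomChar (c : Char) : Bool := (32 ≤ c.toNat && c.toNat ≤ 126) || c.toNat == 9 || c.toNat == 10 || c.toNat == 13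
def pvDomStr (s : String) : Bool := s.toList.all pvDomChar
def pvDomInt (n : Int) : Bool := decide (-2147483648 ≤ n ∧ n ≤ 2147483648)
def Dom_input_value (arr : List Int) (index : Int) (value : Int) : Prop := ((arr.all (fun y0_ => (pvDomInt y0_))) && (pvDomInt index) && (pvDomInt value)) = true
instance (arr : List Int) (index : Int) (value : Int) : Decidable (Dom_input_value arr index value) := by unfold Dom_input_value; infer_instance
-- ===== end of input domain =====

-- B replaces A's per-index retry loop (try/except IndexError) with a closed-form pad count and one
-- bulk fill; objective: simpler. Both Pythons mutate `arr` in place identically; the equivalence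
-- proved here is about the returned list value.

-- ===== PORT A =====
-- The while loop of A, with state (arr, i). Inside the loop `arr[index] = value` is only attempted
-- when i == index, and then 0 ≤ index (the loop was entered), so the Python assignment raises
-- IndexError exactly when ¬ index < len arr; the except branch does arr.insert(i, -1); i -= 1.
def inputLoopA (arr : List Int) (i : Int) (index : Int) (value : Int) : List Int :=
  if _h1 : i < index + 1 then
    if _h2 : i = index then
      if _h3 : index < (arr.length : Int) then
        inputLoopA (arr.set index.toNat value) (i + 1) index value
      else
        inputLoopA (PySem.List.insert arr i (-1)) (i - 1) index value
    else
      inputLoopA arr (i + 1) index value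
  else arr
termination_by (2 * (index + 1 - (arr.length : Int)).toNat + (index + 1 - i).toNat)
decreasing_by
  · simp only [List.length_set]; omega
  · simp only [PySem.List.length_insert]; omega
  · omega

def input_value (arr : List Int) (index : Int) (value : Int) : List Int :=
  inputLoopA arr 0 index value

-- ===== PORT B =====
def input_value_alt (arr : List Int) (index : Int) (value : Int) : List Int :=
  if index < 0 then arr
  else
    let arr2 := if (arr.length : Int) ≤ index
                then arr ++ List.replicate (index - arr.length + 1).toNat (-1)
                else arr
    arr2.set index.toNat value

-- ===== PRECONDITION & SPEC =====
def Spec_input_value (arr : List Int) (index : Int) (value : Int) (out : List Int) : Prop := out = input_value_alt arr index value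
instance (arr : List Int) (index : Int) (value : Int) (out : List Int) : Decidable (Spec_input_value arr index value out) := by unfold Spec_input_value; infer_instance

-- ===== CLAIM (what is proved, stated in full; the proofs are below) =====
def Claim_equal_input_value : Prop := ∀ (arr : List Int) (index : Int) (value : Int), Dom_input_value arr index value → Spec_input_value arr index value (input_value arr index value)

-- ===== LEMMAS AND PROOFS =====

-- Python insert clamps the position to the end when it is ≥ len.
theorem insert_ge_len (arr : List Int) (i : Int) (v : Int) (h : (arr.length : Int) ≤ i) :
    PySem.List.insert arr i v = arr ++ [v] := by
  have h0 : ¬ i < 0 := by omega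
  simp only [PySem.List.insert, PySem.List.sliceIndices]
  norm_num [h0]
  rw [min_eq_right h]
  simp

-- For i below index the loop body only increments i.
theorem inputLoopA_skip (n : Nat) : ∀ (arr : List Int) (i index value : Int),
    (index - i).toNat = n → i ≤ index →
    inputLoopA arr i index value = inputLoopA arr index index value := by
  induction n with
  | zero =>
    intro arr i index value hn hle
    have : i = index := by omega
    subst this; rfl
  | succ k ih =>
    intro arr i index value hn hle
    have hlt : i < index := by omega
    rw [inputLoopA]
    simp only [dif_pos (show i < index + 1 by omega), dif_neg (show ¬ i = index by omega)]
    exact ih arr (i + 1) index value (by omega) (by omega)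

-- At i = index the loop pads with -1 until the assignment succeeds.
theorem inputLoopA_at (n : Nat) : ∀ (arr : List Int) (index value : Int),
    0 ≤ index → (index + 1 - (arr.length : Int)).toNat = n →
    inputLoopA arr index index value =
      (if (arr.length : Int) ≤ index
       then arr ++ List.replicate (index - arr.length + 1).toNat (-1)
       else arr).set index.toNat value := by
  induction n with
  | zero =>
    intro arr index value h0 hn
    have hlen : index < (arr.length : Int) := by omega
    rw [inputLoopA]
    simp only [dif_pos (show index < index + 1 by omega), dif_pos hlen]
    rw [inputLoopA]
    simp only [dif_neg (show ¬ index + 1 < index + 1 by omega)]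
    rw [if_neg (by omega)]
    simp
  | succ k ih =>
    intro arr index value h0 hn
    have hlen : (arr.length : Int) ≤ index := by omega
    rw [inputLoopA]
    simp only [dif_pos (show index < index + 1 by omega), 
               dif_neg (show ¬ index < (arr.length : Int) by omega)]
    rw [insert_ge_len arr index (-1) hlen]
    rw [inputLoopA_skip 1 (arr ++ [-1]) (index - 1) index value (by omega) (by omega)]
    rw [ih (arr ++ [-1]) index value h0 (by simp; omega)]
    rw [if_pos hlen]
    by_cases hc : ((arr.length : Int) + 1 ≤ index)
    · rw [if_pos (by simp; omega)]
      have hrep : (-1 : Int) :: List.replicate (index - ((arr.length : Int) + 1) + 1).toNat (-1 : Int)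
          = List.replicate (index - (arr.length : Int) + 1).toNat (-1 : Int) := by
        rw [← List.replicate_succ]
        congr 1
        omega
      simp only [List.length_append, List.length_singleton, List.append_assoc,
                 List.singleton_append]
      rw [show ((arr.length + 1 : Nat) : Int) = (arr.length : Int) + 1 by push_cast; ring]
      rw [hrep]
      simp
    · -- index = arr.length: one -1 suffices
      rw [if_neg (by simp; omega)]
      have : (index - (arr.length : Int) + 1).toNat = 1 := by omega
      rw [this]
      simp

-- ===== VERDICT (by name: the statement is the Claim_ definition above) =====

theorem input_value_spec : Claim_equal_input_value := by
  intro arr index value _hdom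
  unfold Spec_input_value input_value input_value_alt
  by_cases hneg : index < 0
  · rw [inputLoopA]
    rw [dif_neg (by omega)]
    rw [if_pos hneg]
  · rw [if_neg hneg]
    rw [inputLoopA_skip (index).toNat arr 0 index value (by omega) (by omega)]
    exact inputLoopA_at (index + 1 - (arr.length : Int)).toNat arr index value (by omega) rfl
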